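-- pv_equiv track=rewrite | github.com/extramask93/aoc_2020 | day16.py | find_tickets_outside_of_range
-- ===== SOURCE A (Python) =====
-- from typing import List, Tuple
--
-- def find_tickets_outside_of_range(ranges: List[Tuple[int,int]], tickets: List[int]) -> List[int]:
--     result: List[int] = []
--     for ticket in tickets:
--         found = False
--         for range in ranges:
--             if ticket >= range[0] and ticket<=range[1]:
--                 found = True
--         if not found:
--             result.append(ticket)
--     return result
-- ===== SOURCE B (Python) =====
-- def find_tickets_outside_of_range(ranges, tickets):
--     # Merge the (start-sorted) ranges once into intervals with nondecreasing
--     # starts, then check each ticket by an early-exit scan over the merged list.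
--     merged = []
--     for lo, hi in sorted(ranges, key=lambda r: r[0]):
--         if merged and lo <= merged[-1][1]:
--             merged[-1] = (merged[-1][0], max(merged[-1][1], hi))
--         else:
--             merged.append((lo, hi))
--
--     def covered(t):
--         for lo, hi in merged:
--             if lo > t:
--                 return False
--             if t <= hi:
--                 return True
--         return False
--
--     return [t for t in tickets if not covered(t)]
-- ===== Notes on version B (the rewrite author's own statement) =====
-- stated objective: faster
-- what changed: B sorts the ranges by start and merges them once into start-ordered intervals, then tests each ticket with an early-exit scan over the merged list, instead of A's full pass over all ranges for every ticket with a found-flag.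
import Mathlib
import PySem

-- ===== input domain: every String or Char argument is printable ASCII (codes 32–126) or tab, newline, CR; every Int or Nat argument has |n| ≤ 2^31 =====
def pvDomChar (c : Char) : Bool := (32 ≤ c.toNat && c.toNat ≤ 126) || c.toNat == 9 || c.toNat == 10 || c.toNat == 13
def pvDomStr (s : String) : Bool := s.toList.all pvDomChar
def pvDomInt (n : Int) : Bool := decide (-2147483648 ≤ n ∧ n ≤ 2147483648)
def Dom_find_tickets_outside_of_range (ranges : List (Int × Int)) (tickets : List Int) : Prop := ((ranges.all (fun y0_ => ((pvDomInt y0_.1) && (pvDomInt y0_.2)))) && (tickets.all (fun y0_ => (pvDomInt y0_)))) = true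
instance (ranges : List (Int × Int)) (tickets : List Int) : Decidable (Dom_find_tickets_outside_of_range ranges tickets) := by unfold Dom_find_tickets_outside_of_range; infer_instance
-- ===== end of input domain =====

-- B merges the start-sorted ranges once and checks each ticket by an early-exit
-- scan over the merged, start-ordered intervals, instead of A's full inner scan
-- of all ranges per ticket (objective: faster preprocessing-based alternative).

-- ===== PORT A =====
def find_tickets_outside_of_range (ranges : List (Int × Int)) (tickets : List Int) : List Int :=
  tickets.foldl (fun result ticket =>
    let found := ranges.foldl (fun found r =>
      if ticket ≥ r.1 ∧ ticket ≤ r.2 then true else found) false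
    if !found then result ++ [ticket] else result) []

-- ===== PORT B =====
-- one iteration of Source B's merge loop: extend the last interval or append a new one
def pvMergeStep (merged : List (Int × Int)) (r : Int × Int) : List (Int × Int) :=
  match merged.getLast? with
  | some m => if r.1 ≤ m.2 then merged.dropLast ++ [(m.1, max m.2 r.2)] else merged ++ [r]
  | none => merged ++ [r]

-- Source B's `covered`: early-exit scan over the merged intervals
def pvCovered (merged : List (Int × Int)) (t : Int) : Bool :=
  match merged with
  | [] => false
  | (lo, hi) :: rest => if lo > t then false else if t ≤ hi then true else pvCovered rest t

def find_tickets_outside_of_range_alt (ranges : List (Int × Int)) (tickets : List Int) : List Int :=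
  let merged := (PySem.List.sorted ranges (fun r => r.1) false).foldl pvMergeStep []
  tickets.filter (fun t => !pvCovered merged t)

-- ===== PRECONDITION & SPEC =====
def Spec_find_tickets_outside_of_range (ranges : List (Int × Int)) (tickets : List Int) (out : List Int) : Prop := out = find_tickets_outside_of_range_alt ranges tickets
instance (ranges : List (Int × Int)) (tickets : List Int) (out : List Int) : Decidable (Spec_find_tickets_outside_of_range ranges tickets out) := by unfold Spec_find_tickets_outside_of_range; infer_instance

-- ===== CLAIM (what is proved, stated in full; the proofs are below) =====
def Claim_equal_find_tickets_outside_of_range : Prop := ∀ (ranges : List (Int × Int)) (tickets : List Int), Dom_find_tickets_outside_of_range ranges tickets → Spec_find_tickets_outside_of_range ranges tickets (find_tickets_outside_of_range ranges tickets)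

-- ===== LEMMAS AND PROOFS =====

-- "t is covered by some range of l" (Python's inner test)
def pvAnyCover (l : List (Int × Int)) (t : Int) : Bool :=
  l.any (fun r => decide (r.1 ≤ t ∧ t ≤ r.2))

theorem pvAnyCover_nil (t : Int) : pvAnyCover [] t = false := rfl

theorem pvAnyCover_append (l₁ l₂ : List (Int × Int)) (t : Int) :
    pvAnyCover (l₁ ++ l₂) t = (pvAnyCover l₁ t || pvAnyCover l₂ t) := by
  simp [pvAnyCover]

-- A's inner found-flag loop computes pvAnyCover
theorem found_loop_eq (t : Int) (l : List (Int × Int)) (b : Bool) :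
    l.foldl (fun found r => if t ≥ r.1 ∧ t ≤ r.2 then true else found) b
      = (b || pvAnyCover l t) := by
  induction l generalizing b with
  | nil => simp [pvAnyCover]
  | cons r rest ih =>
    rw [List.foldl_cons, ih]
    simp only [pvAnyCover, List.any_cons]
    by_cases h : t ≥ r.1 ∧ t ≤ r.2
    · have h' : r.1 ≤ t ∧ t ≤ r.2 := ⟨h.1, h.2⟩
      simp [h]
    · have h' : ¬ (r.1 ≤ t ∧ t ≤ r.2) := h
      simp [h']

-- A is a filter by "no range covers"
theorem portA_eq_filter (ranges : List (Int × Int)) (tickets : List Int) :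
    find_tickets_outside_of_range ranges tickets
      = tickets.filter (fun t => !pvAnyCover ranges t) := by
  unfold find_tickets_outside_of_range
  have hfun : (fun (result : List Int) (ticket : Int) =>
      let found := ranges.foldl (fun found r =>
        if ticket ≥ r.1 ∧ ticket ≤ r.2 then true else found) false
      if !found then result ++ [ticket] else result)
      = (fun (result : List Int) (ticket : Int) =>
          if (fun t => !pvAnyCover ranges t) ticket then result ++ [ticket] else result) := by
    funext result ticket
    simp only [found_loop_eq, Bool.false_or]
  rw [hfun, PySem.List.foldl_append_if_eq_filter]
  simp

-- merging one range with the last interval preserves coverage, given start order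
theorem cover_merge (m r : Int × Int) (t : Int)
    (h₁ : m.1 ≤ r.1) (h₂ : r.1 ≤ m.2) :
    (decide (m.1 ≤ t ∧ t ≤ max m.2 r.2) : Bool)
      = (decide (m.1 ≤ t ∧ t ≤ m.2) || decide (r.1 ≤ t ∧ t ≤ r.2)) := by
  rw [← Bool.decide_or, decide_eq_decide]
  constructor
  · rintro ⟨ha, hb⟩
    rcases le_total t m.2 with h | h
    · exact Or.inl ⟨ha, h⟩
    · rcases le_max_iff.mp hb with h2 | h2
      · exact Or.inl ⟨ha, h2⟩
      · exact Or.inr ⟨by omega, h2⟩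
  · rintro (⟨ha, hb⟩ | ⟨ha, hb⟩)
    · exact ⟨ha, le_trans hb (le_max_left _ _)⟩
    · exact ⟨by omega, le_trans hb (le_max_right _ _)⟩

-- invariant predicate on the accumulator: starts are nondecreasing
def pvStartsMono (l : List (Int × Int)) : Prop :=
  l.Pairwise (fun a b => a.1 ≤ b.1)

theorem mergeStep_invariant (acc : List (Int × Int)) (r : Int × Int)
    (hmono : pvStartsMono acc) (hle : ∀ a ∈ acc, a.1 ≤ r.1) :
    pvStartsMono (pvMergeStep acc r)
    ∧ (∀ a ∈ pvMergeStep acc r, ∃ a' ∈ acc ++ [r], a.1 = a'.1)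
    ∧ (∀ t, pvAnyCover (pvMergeStep acc r) t = (pvAnyCover acc t || pvAnyCover [r] t)) := by
  cases hm : acc.getLast? with
  | none =>
    have : acc = [] := List.getLast?_eq_none_iff.mp hm
    subst this
    simp only [pvMergeStep, List.getLast?_nil]
    refine ⟨?_, ?_, ?_⟩
    · simp [pvStartsMono]
    · intro a ha; exact ⟨a, by simpa using ha, rfl⟩
    · intro t; simp [pvAnyCover]
  | some m =>
    have hne : acc ≠ [] := by
      intro h; subst h; simp at hm
    have hdec : acc.dropLast ++ [m] = acc := by
      have hgl : acc.getLast hne = m := by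
        have := List.getLast?_eq_some_getLast hne
        rw [hm] at this; exact (Option.some_inj.mp this.symm)
      rw [← hgl]; exact List.dropLast_concat_getLast hne
    simp only [pvMergeStep, hm]
    have hmmem : m ∈ acc := by
      rw [← hdec]; simp
    by_cases hc : r.1 ≤ m.2
    · rw [if_pos hc]
      have hmono' : pvStartsMono (acc.dropLast ++ [(m.1, max m.2 r.2)]) := by
        unfold pvStartsMono at *
        rw [← hdec] at hmono
        rw [List.pairwise_append] at hmono ⊢
        refine ⟨hmono.1, by simp, ?_⟩
        intro a ha b hb
        simp at hb; subst hb
        exact hmono.2.2 a ha m (by simp)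
      refine ⟨hmono', ?_, ?_⟩
      · intro a ha
        rw [List.mem_append] at ha
        rcases ha with ha | ha
        · exact ⟨a, by rw [← hdec]; simp [ha], rfl⟩
        · simp at ha; subst ha
          exact ⟨m, by simp [hmmem], rfl⟩
      · intro t
        rw [pvAnyCover_append]
        conv_rhs => rw [← hdec]
        rw [pvAnyCover_append]
        have hm1 : m.1 ≤ r.1 := hle m hmmem
        have := cover_merge m r t hm1 hc
        simp only [pvAnyCover, List.any_cons, List.any_nil, Bool.or_false] at this ⊢
        rw [this, Bool.or_assoc]
    · rw [if_neg hc]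
      refine ⟨?_, ?_, ?_⟩
      · unfold pvStartsMono at *
        rw [List.pairwise_append]
        refine ⟨hmono, by simp, ?_⟩
        intro a ha b hb
        simp at hb; subst hb
        exact hle a ha
      · intro a ha; exact ⟨a, ha, rfl⟩
      · intro t; rw [pvAnyCover_append]

-- the merge fold preserves coverage and keeps starts nondecreasing
theorem merge_fold_spec (l acc : List (Int × Int))
    (hl : l.Pairwise (fun a b => a.1 ≤ b.1))
    (hmono : pvStartsMono acc)
    (hacc : ∀ a ∈ acc, ∀ b ∈ l, a.1 ≤ b.1) :
    pvStartsMono (l.foldl pvMergeStep acc)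
    ∧ (∀ t, pvAnyCover (l.foldl pvMergeStep acc) t = (pvAnyCover acc t || pvAnyCover l t)) := by
  induction l generalizing acc with
  | nil => exact ⟨hmono, fun t => by simp [pvAnyCover]⟩
  | cons r rest ih =>
    rw [List.pairwise_cons] at hl
    have hle : ∀ a ∈ acc, a.1 ≤ r.1 := fun a ha => hacc a ha r (by simp)
    obtain ⟨hmono', hmem', hcov'⟩ := mergeStep_invariant acc r hmono hle
    have hacc' : ∀ a ∈ pvMergeStep acc r, ∀ b ∈ rest, a.1 ≤ b.1 := by
      intro a ha b hb
      obtain ⟨a', ha', heq⟩ := hmem' a ha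
      rw [heq]
      rw [List.mem_append] at ha'
      rcases ha' with ha' | ha'
      · exact hacc a' ha' b (by simp [hb])
      · simp at ha'; subst ha'; exact hl.1 b hb
    obtain ⟨hm, hc⟩ := ih (pvMergeStep acc r) hl.2 hmono' hacc'
    refine ⟨hm, fun t => ?_⟩
    rw [List.foldl_cons, hc, hcov']
    simp only [pvAnyCover, List.any_cons, List.any_nil, Bool.or_false]
    ac_rfl

-- the early-exit scan agrees with a full scan on a start-ordered list
theorem covered_eq_anyCover (l : List (Int × Int)) (t : Int)
    (hmono : pvStartsMono l) :
    pvCovered l t = pvAnyCover l t := by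
  induction l with
  | nil => rfl
  | cons p rest ih =>
    obtain ⟨lo, hi⟩ := p
    rw [pvStartsMono, List.pairwise_cons] at hmono
    unfold pvCovered
    by_cases h1 : lo > t
    · rw [if_pos h1]
      have : pvAnyCover ((lo, hi) :: rest) t = false := by
        simp only [pvAnyCover, List.any_eq_false]
        intro r hr
        simp only [List.mem_cons] at hr
        rcases hr with hr | hr
        · subst hr; simp; omega
        · have := hmono.1 r hr
          simp at this ⊢
          omega
      rw [this]
    · rw [if_neg h1]
      by_cases h2 : t ≤ hi
      · rw [if_pos h2]
        have : (lo ≤ t ∧ t ≤ hi) := ⟨by omega, h2⟩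
        simp [pvAnyCover, this]
      · rw [if_neg h2]
        have hnc : ¬ ((lo, hi).1 ≤ t ∧ t ≤ (lo, hi).2) := by simp; omega
        simp only [pvAnyCover, List.any_cons]
        rw [ih hmono.2]
        simp [hnc, pvAnyCover]

-- ===== VERDICT (by name: the statement is the Claim_ definition above) =====
theorem find_tickets_outside_of_range_spec : Claim_equal_find_tickets_outside_of_range := by
  intro ranges tickets _
  unfold Spec_find_tickets_outside_of_range
  rw [portA_eq_filter]
  unfold find_tickets_outside_of_range_alt
  have hsortmono : (PySem.List.sorted ranges (fun r => r.1) false).Pairwise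
      (fun a b : Int × Int => a.1 ≤ b.1) := PySem.List.sorted_pairwise ..
  obtain ⟨hmono, hcov⟩ := merge_fold_spec (PySem.List.sorted ranges (fun r => r.1) false) []
    hsortmono (by simp [pvStartsMono]) (by simp)
  have hperm : (PySem.List.sorted ranges (fun r => r.1) false).Perm ranges :=
    PySem.List.sorted_perm ..
  apply List.filter_congr
  intro t _
  rw [covered_eq_anyCover _ t hmono, hcov t, pvAnyCover_nil, Bool.false_or]
  unfold pvAnyCover
  rw [hperm.any_eq]
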